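-- pv_equiv track=rewrite | github.com/fweiner/parrotsoftware-treatment | backend/app/routers/life_words_information.py | format_phone_for_tts
-- ===== SOURCE A (Python) =====
-- def format_phone_for_tts(phone: str) -> str:
--     """Format phone number for TTS to read digits individually."""
--     # Extract only digits
--     digits = ''.join(c for c in str(phone) if c.isdigit())
--     if len(digits) == 10:
--         # Format as (XXX) XXX-XXXX with spaces for TTS
--         return f"{digits[0]} {digits[1]} {digits[2]}, {digits[3]} {digits[4]} {digits[5]}, {digits[6]} {digits[7]} {digits[8]} {digits[9]}"
--     elif len(digits) == 7:
--         # Format as XXX-XXXX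
--         return f"{digits[0]} {digits[1]} {digits[2]}, {digits[3]} {digits[4]} {digits[5]} {digits[6]}"
--     else:
--         # Just space out all digits
--         return ' '.join(digits)
-- ===== SOURCE B (Python) =====
-- def format_phone_for_tts(phone: str) -> str:
--     """Format phone number for TTS to read digits individually."""
--     digits = ''.join(c for c in str(phone) if c.isdigit())
--     sizes = {10: [3, 3, 4], 7: [3, 4]}.get(len(digits), [len(digits)])
--     groups = []
--     i = 0
--     for n in sizes:
--         groups.append(' '.join(digits[i:i + n]))
--         i += n
--     return ', '.join(groups)
-- ===== Notes on version B (the rewrite author's own statement) =====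
-- stated objective: simpler
-- what changed: Replaces the three hardcoded per-index f-string branches by one uniform loop that slices successive digit groups from a length-derived group-size list ([3,3,4] for 10, [3,4] for 7, one group otherwise) and joins the groups with a comma-space separator.
import Mathlib
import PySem

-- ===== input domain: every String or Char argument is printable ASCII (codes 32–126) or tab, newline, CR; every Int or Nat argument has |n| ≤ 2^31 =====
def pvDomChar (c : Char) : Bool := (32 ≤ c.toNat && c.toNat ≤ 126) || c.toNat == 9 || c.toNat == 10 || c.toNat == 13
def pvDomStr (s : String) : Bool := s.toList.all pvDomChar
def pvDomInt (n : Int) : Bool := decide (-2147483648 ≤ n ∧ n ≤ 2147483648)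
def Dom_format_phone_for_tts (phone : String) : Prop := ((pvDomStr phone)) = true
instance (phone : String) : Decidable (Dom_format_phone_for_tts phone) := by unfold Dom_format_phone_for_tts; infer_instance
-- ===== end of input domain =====

-- B replaces A's three hardcoded f-string branches by one uniform slice-and-join loop over a
-- length-derived group-size list; same output, simpler decomposition (objective: simpler).

-- ===== PORT A =====
def format_phone_for_tts (phone : String) : String :=
  -- digits = ''.join(c for c in str(phone) if c.isdigit())
  let digits : List Char := phone.toList.filter PySem.Chars.isdigit
  if digits.length = 10 then
    -- f"{digits[0]} {digits[1]} {digits[2]}, {digits[3]} {digits[4]} {digits[5]}, {digits[6]} {digits[7]} {digits[8]} {digits[9]}"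
    String.ofList [digits[0]!, ' ', digits[1]!, ' ', digits[2]!, ',', ' ',
               digits[3]!, ' ', digits[4]!, ' ', digits[5]!, ',', ' ',
               digits[6]!, ' ', digits[7]!, ' ', digits[8]!, ' ', digits[9]!]
  else if digits.length = 7 then
    -- f"{digits[0]} {digits[1]} {digits[2]}, {digits[3]} {digits[4]} {digits[5]} {digits[6]}"
    String.ofList [digits[0]!, ' ', digits[1]!, ' ', digits[2]!, ',', ' ',
               digits[3]!, ' ', digits[4]!, ' ', digits[5]!, ' ', digits[6]!]
  else
    -- ' '.join(digits)
    String.ofList (PySem.Chars.join [' '] (digits.map (fun c => [c])))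

-- ===== PORT B =====
-- ' '.join(digits[i:i+n]) for one group (slice of nonnegative in-order bounds = drop/take, exact here)
def pvGroupsB (ds : List Char) (i : Nat) : List Nat → List (List Char)
  | [] => []
  | n :: rest => PySem.Chars.join [' '] (((ds.drop i).take n).map (fun c => [c])) :: pvGroupsB ds (i + n) rest

def format_phone_for_tts_alt (phone : String) : String :=
  let digits : List Char := phone.toList.filter PySem.Chars.isdigit
  let sizes : List Nat :=
    if digits.length = 10 then [3, 3, 4]
    else if digits.length = 7 then [3, 4]
    else [digits.length]
  String.ofList (PySem.Chars.join [',', ' '] (pvGroupsB digits 0 sizes))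

-- ===== PRECONDITION & SPEC =====
def Spec_format_phone_for_tts (phone : String) (out : String) : Prop := out = format_phone_for_tts_alt phone
instance (phone : String) (out : String) : Decidable (Spec_format_phone_for_tts phone out) := by unfold Spec_format_phone_for_tts; infer_instance

-- ===== CLAIM (what is proved, stated in full; the proofs are below) =====
def Claim_equal_format_phone_for_tts : Prop := ∀ (phone : String), Dom_format_phone_for_tts phone → Spec_format_phone_for_tts phone (format_phone_for_tts phone)

-- ===== LEMMAS AND PROOFS =====

theorem pv_core (ds : List Char) :
    (if ds.length = 10 then
      String.ofList [ds[0]!, ' ', ds[1]!, ' ', ds[2]!, ',', ' ',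
                 ds[3]!, ' ', ds[4]!, ' ', ds[5]!, ',', ' ',
                 ds[6]!, ' ', ds[7]!, ' ', ds[8]!, ' ', ds[9]!]
     else if ds.length = 7 then
      String.ofList [ds[0]!, ' ', ds[1]!, ' ', ds[2]!, ',', ' ',
                 ds[3]!, ' ', ds[4]!, ' ', ds[5]!, ' ', ds[6]!]
     else String.ofList (PySem.Chars.join [' '] (ds.map (fun c => [c])))) =
    String.ofList (PySem.Chars.join [',', ' ']
      (pvGroupsB ds 0 (if ds.length = 10 then [3, 3, 4]
                       else if ds.length = 7 then [3, 4] else [ds.length]))) := by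
  by_cases h10 : ds.length = 10
  · match ds, h10 with
    | [a,b,c,d,e,f,g,h,i,j], _ => rfl
  · by_cases h7 : ds.length = 7
    · match ds, h7 with
      | [a,b,c,d,e,f,g], _ => rfl
    · simp only [h10, h7, if_false, pvGroupsB]
      simp [PySem.Chars.join, List.intercalate]

-- ===== VERDICT (by name: the statement is the Claim_ definition above) =====
theorem format_phone_for_tts_spec : Claim_equal_format_phone_for_tts := by
  intro phone _
  unfold Spec_format_phone_for_tts format_phone_for_tts format_phone_for_tts_alt
  exact pv_core _
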